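-- pv_equiv track=rewrite | github.com/vr-jayashree5443/CodeVita-2020-Problem-5---Stock-Solution | A5_stock.py | calculate_profit_loss
-- ===== SOURCE A (Python) =====
-- def calculate_profit_loss(N, stocks_info, M, stock_prices, day):
--     realized_profit = 0
--     unrealized_profit = 0
--     max1=max2=0
--     for i in range(N):
--         quantity, purchase_day, sell_day = stocks_info[i]
--         if sell_day == 0 or sell_day > day:
--             unrealized_profit += quantity * (stock_prices[i][day - 1] - stock_prices[i][purchase_day - 1])
--         else:
--             realized_profit += quantity * (stock_prices[i][sell_day - 1] - stock_prices[i][purchase_day - 1])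
--
--         if(max1<realized_profit):
--             max1=realized_profit
--         if(max2<unrealized_profit):
--             max2=unrealized_profit
--     return max1,max2
-- ===== SOURCE B (Python) =====
-- def _best_prefix(increments):
--     total = 0
--     best = 0
--     for x in increments:
--         total += x
--         if total > best:
--             best = total
--     return best
--
--
-- def calculate_profit_loss(N, stocks_info, M, stock_prices, day):
--     realized = []
--     unrealized = []
--     for i in range(N):
--         quantity, purchase_day, sell_day = stocks_info[i]
--         prices = stock_prices[i]
--         base = prices[purchase_day - 1]
--         if sell_day != 0 and sell_day <= day:
--             realized.append(quantity * (prices[sell_day - 1] - base))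
--         else:
--             unrealized.append(quantity * (prices[day - 1] - base))
--     return _best_prefix(realized), _best_prefix(unrealized)
-- ===== Notes on version B (the rewrite author's own statement) =====
-- stated objective: alternative
-- what changed: Replaces A's single fused scan carrying a 4-tuple (both running sums and both running maxima) by classify-then-reduce: one pass partitions each stock's profit increment into a realized or unrealized list, then an independent best-prefix-sum reduction of each list yields the two maxima.
import Mathlib
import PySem

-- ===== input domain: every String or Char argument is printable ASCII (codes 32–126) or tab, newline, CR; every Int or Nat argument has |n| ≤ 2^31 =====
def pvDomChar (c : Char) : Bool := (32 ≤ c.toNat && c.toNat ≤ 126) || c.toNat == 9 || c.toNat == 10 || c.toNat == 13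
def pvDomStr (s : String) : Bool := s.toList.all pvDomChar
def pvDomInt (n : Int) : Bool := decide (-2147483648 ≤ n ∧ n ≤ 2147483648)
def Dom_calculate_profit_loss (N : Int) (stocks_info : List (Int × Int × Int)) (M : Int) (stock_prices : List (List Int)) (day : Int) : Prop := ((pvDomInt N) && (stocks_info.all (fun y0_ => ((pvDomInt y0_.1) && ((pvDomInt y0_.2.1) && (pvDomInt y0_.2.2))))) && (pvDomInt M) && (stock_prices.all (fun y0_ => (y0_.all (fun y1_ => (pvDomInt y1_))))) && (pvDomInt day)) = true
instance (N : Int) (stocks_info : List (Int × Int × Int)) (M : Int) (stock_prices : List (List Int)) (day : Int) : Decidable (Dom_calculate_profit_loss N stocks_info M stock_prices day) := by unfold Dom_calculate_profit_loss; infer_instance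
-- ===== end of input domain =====

-- B replaces A's fused scan (4-tuple state) by classify-into-two-lists then independent best-prefix-sum reductions; alternative decomposition, same cost.


-- xs[i] with Python index semantics; the default is only reached outside Pre_ (where Python raises)
def pvIdx (xs : List Int) (i : Int) : Int := (PySem.List.pyGet? xs i).getD 0

-- ===== PORT A =====
-- A's 'for i in range(N)' loop over state (realized_profit, unrealized_profit, max1, max2);
-- it stops where Python's stocks_info[i]/stock_prices[i] raises IndexError (outside Pre_)
def loopA (si : List (Int × Int × Int)) (sp : List (List Int)) (day N i : Int)
    (st : Int × Int × Int × Int) : Int × Int × Int × Int :=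
  if i < N then
    match PySem.List.pyGet? si i, PySem.List.pyGet? sp i with
    | some info, some row =>
        let quantity := info.1
        let purchase_day := info.2.1
        let sell_day := info.2.2
        let rp := st.1
        let up := st.2.1
        let m1 := st.2.2.1
        let m2 := st.2.2.2
        let rp' := if sell_day = 0 ∨ sell_day > day then rp
                   else rp + quantity * (pvIdx row (sell_day - 1) - pvIdx row (purchase_day - 1))
        let up' := if sell_day = 0 ∨ sell_day > day then
                     up + quantity * (pvIdx row (day - 1) - pvIdx row (purchase_day - 1))
                   else up
        let m1' := if m1 < rp' then rp' else m1
        let m2' := if m2 < up' then up' else m2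
        loopA si sp day N (i + 1) (rp', up', m1', m2')
    | _, _ => st
  else st
termination_by (N - i).toNat
decreasing_by omega

def calculate_profit_loss (N : Int) (stocks_info : List (Int × Int × Int)) (M : Int) (stock_prices : List (List Int)) (day : Int) : Int × Int :=
  let r := loopA stocks_info stock_prices day N 0 (0, 0, 0, 0)
  (r.2.2.1, r.2.2.2)

-- ===== PORT B =====
-- B's classification loop building (realized, unrealized); same stopping rule as Python's IndexError
def loopB (si : List (Int × Int × Int)) (sp : List (List Int)) (day N i : Int)
    (acc : List Int × List Int) : List Int × List Int :=
  if i < N then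
    match PySem.List.pyGet? si i, PySem.List.pyGet? sp i with
    | some info, some prices =>
        let quantity := info.1
        let purchase_day := info.2.1
        let sell_day := info.2.2
        let base := pvIdx prices (purchase_day - 1)
        let acc' := if ¬ sell_day = 0 ∧ sell_day ≤ day then
                      (acc.1 ++ [quantity * (pvIdx prices (sell_day - 1) - base)], acc.2)
                    else
                      (acc.1, acc.2 ++ [quantity * (pvIdx prices (day - 1) - base)])
        loopB si sp day N (i + 1) acc'
    | _, _ => acc
  else acc
termination_by (N - i).toNat
decreasing_by omega

-- B's _best_prefix helper
def bestPrefix (xs : List Int) : Int :=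
  (xs.foldl (fun tb x => (tb.1 + x, if tb.1 + x > tb.2 then tb.1 + x else tb.2)) ((0 : Int), (0 : Int))).2

def calculate_profit_loss_alt (N : Int) (stocks_info : List (Int × Int × Int)) (M : Int) (stock_prices : List (List Int)) (day : Int) : Int × Int :=
  let p := loopB stocks_info stock_prices day N 0 ([], [])
  (bestPrefix p.1, bestPrefix p.2)

-- ===== PRECONDITION & SPEC =====
-- Pre_ excludes exactly the inputs where Python A raises an IndexError (a loop index past the
-- end of stocks_info/stock_prices, or a day/purchase/sell index outside the price row).
def Pre_calculate_profit_loss (N : Int) (stocks_info : List (Int × Int × Int)) (M : Int) (stock_prices : List (List Int)) (day : Int) : Prop :=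
  N ≤ stocks_info.length ∧ N ≤ stock_prices.length ∧
  ∀ p ∈ (stocks_info.zip stock_prices).take N.toNat,
    PySem.Raise.InRange p.2.length (p.1.2.1 - 1) ∧
    (if p.1.2.2 = 0 ∨ p.1.2.2 > day then PySem.Raise.InRange p.2.length (day - 1)
     else PySem.Raise.InRange p.2.length (p.1.2.2 - 1))
instance (N : Int) (stocks_info : List (Int × Int × Int)) (M : Int) (stock_prices : List (List Int)) (day : Int) : Decidable (Pre_calculate_profit_loss N stocks_info M stock_prices day) := by unfold Pre_calculate_profit_loss; infer_instance

def pvWitness_calculate_profit_loss : Int × (List (Int × Int × Int)) × Int × List (List Int) × Int :=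
  (1, [(1, 1, 0)], 1, [[1, 2]], 2)

def Spec_calculate_profit_loss (N : Int) (stocks_info : List (Int × Int × Int)) (M : Int) (stock_prices : List (List Int)) (day : Int) (out : Int × Int) : Prop := out = calculate_profit_loss_alt N stocks_info M stock_prices day
instance (N : Int) (stocks_info : List (Int × Int × Int)) (M : Int) (stock_prices : List (List Int)) (day : Int) (out : Int × Int) : Decidable (Spec_calculate_profit_loss N stocks_info M stock_prices day out) := by unfold Spec_calculate_profit_loss; infer_instance

-- ===== CLAIM (what is proved, stated in full; the proofs are below) =====
def Claim_equal_calculate_profit_loss : Prop := ∀ (N : Int) (stocks_info : List (Int × Int × Int)) (M : Int) (stock_prices : List (List Int)) (day : Int), Dom_calculate_profit_loss N stocks_info M stock_prices day → Pre_calculate_profit_loss N stocks_info M stock_prices day → Spec_calculate_profit_loss N stocks_info M stock_prices day (calculate_profit_loss N stocks_info M stock_prices day)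

-- ===== LEMMAS AND PROOFS =====

-- running (sum, max) of prefix sums started from (t, b)
def bestFrom (t b : Int) (xs : List Int) : Int × Int :=
  xs.foldl (fun tb x => (tb.1 + x, if tb.1 + x > tb.2 then tb.1 + x else tb.2)) (t, b)

theorem loopB_append (si : List (Int × Int × Int)) (sp : List (List Int)) (day N : Int) :
    ∀ (k : Nat) (i : Int), (N - i).toNat = k → ∀ (a b : List Int),
      loopB si sp day N i (a, b) =
        (a ++ (loopB si sp day N i ([], [])).1, b ++ (loopB si sp day N i ([], [])).2) := by
  intro k
  induction k with
  | zero =>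
      intro i hk a b
      rw [loopB, loopB]
      have : ¬ i < N := by omega
      simp [this]
  | succ k ih =>
      intro i hk a b
      rw [loopB, loopB]
      have hiN : i < N := by omega
      simp only [hiN, if_true]
      cases hsi : PySem.List.pyGet? si i with
      | none => simp
      | some info =>
        cases hsp : PySem.List.pyGet? sp i with
        | none => simp
        | some prices =>
          simp only
          by_cases h : ¬ info.2.2 = 0 ∧ info.2.2 ≤ day
          · simp only [if_pos h]
            rw [ih (i + 1) (by omega)
                  (a ++ [info.1 * (pvIdx prices (info.2.2 - 1) - pvIdx prices (info.2.1 - 1))]) b,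
                ih (i + 1) (by omega)
                  ([] ++ [info.1 * (pvIdx prices (info.2.2 - 1) - pvIdx prices (info.2.1 - 1))]) []]
            simp
          · simp only [if_neg h]
            rw [ih (i + 1) (by omega)
                  a (b ++ [info.1 * (pvIdx prices (day - 1) - pvIdx prices (info.2.1 - 1))]),
                ih (i + 1) (by omega)
                  [] ([] ++ [info.1 * (pvIdx prices (day - 1) - pvIdx prices (info.2.1 - 1))])]
            simp

theorem main_loop (si : List (Int × Int × Int)) (sp : List (List Int)) (day N : Int) :
    ∀ (k : Nat) (i : Int), (N - i).toNat = k → ∀ (rp up m1 m2 : Int), rp ≤ m1 → up ≤ m2 →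
      loopA si sp day N i (rp, up, m1, m2) =
        ((bestFrom rp m1 (loopB si sp day N i ([], [])).1).1,
         (bestFrom up m2 (loopB si sp day N i ([], [])).2).1,
         (bestFrom rp m1 (loopB si sp day N i ([], [])).1).2,
         (bestFrom up m2 (loopB si sp day N i ([], [])).2).2) := by
  intro k
  induction k with
  | zero =>
      intro i hk rp up m1 m2 h1 h2
      rw [loopA, loopB]
      have : ¬ i < N := by omega
      simp [this, bestFrom]
  | succ k ih =>
      intro i hk rp up m1 m2 h1 h2
      rw [loopA, loopB]
      have hiN : i < N := by omega
      simp only [hiN, if_true]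
      cases hsi : PySem.List.pyGet? si i with
      | none => simp [bestFrom]
      | some info =>
        cases hsp : PySem.List.pyGet? sp i with
        | none => simp [bestFrom]
        | some row =>
          simp only
          by_cases hc : info.2.2 = 0 ∨ info.2.2 > day
          · -- unrealized step
            have hnb : ¬ (¬ info.2.2 = 0 ∧ info.2.2 ≤ day) := by
              rcases hc with h | h
              · exact fun hh => hh.1 h
              · exact fun hh => by omega
            have hm1 : ¬ m1 < rp := by omega
            simp only [if_pos hc, if_neg hnb, if_neg hm1]
            rw [loopB_append si sp day N k (i + 1) (by omega)
                  [] ([] ++ [info.1 * (pvIdx row (day - 1) - pvIdx row (info.2.1 - 1))])]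
            rw [ih (i + 1) (by omega) rp
                (up + info.1 * (pvIdx row (day - 1) - pvIdx row (info.2.1 - 1))) m1
                (if m2 < up + info.1 * (pvIdx row (day - 1) - pvIdx row (info.2.1 - 1))
                 then up + info.1 * (pvIdx row (day - 1) - pvIdx row (info.2.1 - 1)) else m2)
                h1 (by split <;> omega)]
            simp [bestFrom, gt_iff_lt]
          · -- realized step
            have hb : (¬ info.2.2 = 0 ∧ info.2.2 ≤ day) := by constructor <;> omega
            have hm2 : ¬ m2 < up := by omega
            simp only [if_neg hc, if_pos hb, if_neg hm2]
            rw [loopB_append si sp day N k (i + 1) (by omega)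
                  ([] ++ [info.1 * (pvIdx row (info.2.2 - 1) - pvIdx row (info.2.1 - 1))]) []]
            rw [ih (i + 1) (by omega)
                (rp + info.1 * (pvIdx row (info.2.2 - 1) - pvIdx row (info.2.1 - 1))) up
                (if m1 < rp + info.1 * (pvIdx row (info.2.2 - 1) - pvIdx row (info.2.1 - 1))
                 then rp + info.1 * (pvIdx row (info.2.2 - 1) - pvIdx row (info.2.1 - 1)) else m1)
                m2 (by split <;> omega) h2]
            simp [bestFrom, gt_iff_lt]

-- ===== VERDICT (by name: the statement is the Claim_ definition above) =====
theorem calculate_profit_loss_spec : Claim_equal_calculate_profit_loss := by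
  intro N si M sp day _ _
  unfold Spec_calculate_profit_loss calculate_profit_loss calculate_profit_loss_alt
  rw [main_loop si sp day N (N - 0).toNat 0 rfl 0 0 0 0 le_rfl le_rfl]
  rfl
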